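-- pv_equiv track=rewrite | github.com/dlsrnjs125/Algorithm | 프로그래머스/0/181854. 배열의 길이에 따라 다른 연산하기/배열의 길이에 따라 다른 연산하기.py | solution
-- ===== SOURCE A (Python) =====
-- def solution(arr, n):
--     answer = []
--
--     if len(arr) % 2 == 0:
--         for idx, i in enumerate(arr):
--             if idx % 2 != 0:
--                 answer.append(i+n)
--             else:
--                 answer.append(i)
--     else:
--         for idx, i in enumerate(arr):
--             if idx % 2 == 0:
--                 answer.append(i+n)
--             else:
--                 answer.append(i)
--     return answer
-- ===== SOURCE B (Python) =====
-- def _pairs(xs, n):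
--     # xs has even length: return [xs[0], xs[1]+n, xs[2], xs[3]+n, ...]
--     out = []
--     for i in range(0, len(xs), 2):
--         out.append(xs[i])
--         out.append(xs[i + 1] + n)
--     return out
--
--
-- def solution(arr, n):
--     if len(arr) % 2 == 1:
--         return [arr[0] + n] + _pairs(arr[1:], n)
--     return _pairs(arr, n)
-- ===== Notes on version B (the rewrite author's own statement) =====
-- stated objective: simpler
-- what changed: Replaces A's if-on-length with two enumerate loops branching on index parity by a pairwise pass: peel the head (adding n) when the length is odd, then add n to the second element of each consecutive pair.
import Mathlib
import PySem

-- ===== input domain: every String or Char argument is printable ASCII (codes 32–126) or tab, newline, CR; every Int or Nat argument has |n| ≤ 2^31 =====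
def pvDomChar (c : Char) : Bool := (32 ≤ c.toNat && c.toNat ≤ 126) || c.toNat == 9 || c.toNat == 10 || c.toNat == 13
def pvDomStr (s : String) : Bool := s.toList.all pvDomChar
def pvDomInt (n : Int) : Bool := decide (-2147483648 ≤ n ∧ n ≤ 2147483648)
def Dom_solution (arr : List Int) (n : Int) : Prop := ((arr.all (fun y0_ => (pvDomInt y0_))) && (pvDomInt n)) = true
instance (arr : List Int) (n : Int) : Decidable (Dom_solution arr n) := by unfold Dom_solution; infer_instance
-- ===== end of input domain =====

-- B replaces A's enumerate-with-parity-branch loop by a pairwise pass (peel the head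
-- when the length is odd, then add n to the second element of each pair); objective: simpler.

-- ===== PORT A =====
def solution (arr : List Int) (n : Int) : List Int :=
  if (arr.length : Int) % 2 = 0 then
    (PySem.List.enumerate arr).foldl
      (fun answer p =>
        if p.1 % 2 ≠ 0 then answer ++ [p.2 + n] else answer ++ [p.2]) []
  else
    (PySem.List.enumerate arr).foldl
      (fun answer p =>
        if p.1 % 2 = 0 then answer ++ [p.2 + n] else answer ++ [p.2]) []

-- ===== PORT B =====
-- B's helper _pairs: on an even-length list, add n to the second element of each pair.
def pairsAdd (n : Int) : List Int → List Int
  | a :: b :: rest => a :: (b + n) :: pairsAdd n rest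
  | xs => xs

def solution_alt (arr : List Int) (n : Int) : List Int :=
  if (arr.length : Int) % 2 = 1 then
    match arr with
    | [] => []          -- unreachable: an odd-length list is nonempty
    | a :: rest => ((a + n) :: []) ++ pairsAdd n rest
  else
    pairsAdd n arr

-- ===== PRECONDITION & SPEC =====
def Spec_solution (arr : List Int) (n : Int) (out : List Int) : Prop := out = solution_alt arr n
instance (arr : List Int) (n : Int) (out : List Int) : Decidable (Spec_solution arr n out) := by unfold Spec_solution; infer_instance

-- ===== CLAIM (what is proved, stated in full; the proofs are below) =====
def Claim_equal_solution : Prop := ∀ (arr : List Int) (n : Int), Dom_solution arr n → Spec_solution arr n (solution arr n)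

-- ===== LEMMAS AND PROOFS =====

-- A's append-in-branches loop body as a single append of a branched element.
theorem foldl_branch (n : Int) (c : Int × Int → Prop) [DecidablePred c] :
    ∀ (l : List (Int × Int)) (acc : List Int),
      l.foldl (fun answer p => if c p then answer ++ [p.2 + n] else answer ++ [p.2]) acc
        = acc ++ l.map (fun p => if c p then p.2 + n else p.2) := by
  intro l
  induction l with
  | nil => intro acc; simp
  | cons p l ih =>
      intro acc
      simp only [List.foldl_cons, List.map_cons]
      by_cases h : c p <;> simp [h, ih]

-- starting at an even index, "add n at odd indices" is the pairwise pass
theorem map_enum_even (n : Int) :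
    ∀ (xs : List Int) (s : Int), s % 2 = 0 →
      (PySem.List.enumerate xs s).map (fun p => if p.1 % 2 ≠ 0 then p.2 + n else p.2)
        = pairsAdd n xs
  | [], s, h => by simp [PySem.List.enumerate_nil, pairsAdd]
  | [a], s, h => by
      simp [PySem.List.enumerate_cons, PySem.List.enumerate_nil, pairsAdd, h]
  | a :: b :: rest, s, h => by
      have h1 : (s + 1) % 2 = 1 := by omega
      simp only [PySem.List.enumerate_cons, List.map_cons, pairsAdd]
      rw [map_enum_even n rest (s + 1 + 1) (by omega)]
      simp [h, h1]

-- starting at an odd index, "add n at even indices" is the pairwise pass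
theorem map_enum_odd (n : Int) :
    ∀ (xs : List Int) (s : Int), s % 2 = 1 →
      (PySem.List.enumerate xs s).map (fun p => if p.1 % 2 = 0 then p.2 + n else p.2)
        = pairsAdd n xs
  | [], s, h => by simp [PySem.List.enumerate_nil, pairsAdd]
  | [a], s, h => by
      have h0 : ¬ s % 2 = 0 := by omega
      simp only [PySem.List.enumerate_cons, PySem.List.enumerate_nil, List.map_cons,
        List.map_nil, pairsAdd, if_neg h0]
  | a :: b :: rest, s, h => by
      have h0 : ¬ s % 2 = 0 := by omega
      have h1 : (s + 1) % 2 = 0 := by omega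
      simp only [PySem.List.enumerate_cons, List.map_cons, pairsAdd]
      rw [map_enum_odd n rest (s + 1 + 1) (by omega)]
      simp [h0, h1]

-- ===== VERDICT (by name: the statement is the Claim_ definition above) =====
theorem solution_spec : Claim_equal_solution := by
  intro arr n _
  show solution arr n = solution_alt arr n
  unfold solution solution_alt
  by_cases he : (arr.length : Int) % 2 = 0
  · have ho : ¬ (arr.length : Int) % 2 = 1 := by omega
    rw [if_pos he, if_neg ho, foldl_branch, map_enum_even n arr 0 (by norm_num)]
    simp
  · have ho : (arr.length : Int) % 2 = 1 := by omega
    rw [if_neg he, if_pos ho, foldl_branch]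
    cases arr with
    | nil => simp at ho
    | cons a rest =>
        simp only [PySem.List.enumerate, List.map_cons]
        rw [map_enum_odd n rest (0 + 1) (by norm_num)]
        simp
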